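-- pv_equiv track=rewrite | github.com/Routstr/sixty-nuts | sixty_nuts/mint.py | _default_split
-- ===== SOURCE A (Python) =====
-- def _default_split(amount: int) -> dict[int, int]:
--     """Default split using powers of 2."""
--     denominations: dict[int, int] = {}
--     remaining = amount
--
--     for denom in [
--         16384,
--         8192,
--         4096,
--         2048,
--         1024,
--         512,
--         256,
--         128,
--         64,
--         32,
--         16,
--         8,
--         4,
--         2,
--         1,
--     ]:
--         if remaining >= denom:
--             count = remaining // denom
--             denominations[denom] = count
--             remaining -= denom * count
--
--     return denominations
-- ===== SOURCE B (Python) =====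
-- def _default_split(amount: int) -> dict[int, int]:
--     """Default split using powers of 2, built by recursive halving from the low bit up."""
--     if amount <= 0:
--         return {}
--     return _split(amount, 0)
--
--
-- def _split(n: int, k: int) -> dict[int, int]:
--     """Split n * 2**k over denominations 2**k .. 16384 (everything at/above 2**14 pools at 16384)."""
--     if n == 0:
--         return {}
--     if k >= 14:
--         return {16384: n}
--     d = _split(n // 2, k + 1)
--     if n % 2:
--         d[2 ** k] = 1
--     return d
-- ===== Notes on version B (the rewrite author's own statement) =====
-- stated objective: alternative
-- what changed: Replaces the iterative greedy loop over the fixed descending denomination list (compare/divide/subtract on a running remainder) with a recursive halving of the amount: a helper recurses on the half while raising the denomination level, pools whatever reaches the top level into the largest-denomination bucket, and inserts a unit entry for each odd halving step on the way back.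
import Mathlib
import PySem

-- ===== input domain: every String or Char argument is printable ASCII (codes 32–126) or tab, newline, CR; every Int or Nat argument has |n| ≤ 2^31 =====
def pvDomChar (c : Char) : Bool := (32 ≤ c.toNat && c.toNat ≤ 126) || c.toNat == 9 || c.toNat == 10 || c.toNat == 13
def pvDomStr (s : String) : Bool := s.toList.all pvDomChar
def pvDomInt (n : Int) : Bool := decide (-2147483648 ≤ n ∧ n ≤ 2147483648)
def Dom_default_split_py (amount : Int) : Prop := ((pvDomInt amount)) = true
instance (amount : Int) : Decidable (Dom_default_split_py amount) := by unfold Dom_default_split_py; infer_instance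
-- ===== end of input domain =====

-- B replaces A's iterative greedy over the fixed descending denomination list by a recursive halving of the amount that builds the dict on the way back (alternative decomposition, same result).

-- ===== PORT A =====
-- loop body of A's for-loop (if remaining >= denom: count = remaining // denom; dict insert; remaining -= denom * count)
def stepA (st : PySem.Dict Int Int × Int) (denom : Int) : PySem.Dict Int Int × Int :=
  if st.2 ≥ denom then
    let count := PySem.Int.floordiv st.2 denom
    (st.1.insert denom count, st.2 - denom * count)
  else st

def default_split_py (amount : Int) : List (Int × Int) :=
  (([16384, 8192, 4096, 2048, 1024, 512, 256, 128, 64, 32, 16, 8, 4, 2, 1] : List Int).foldl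
    stepA (PySem.Dict.empty, amount)).1.items

-- ===== PORT B =====
-- B's recursive helper _split(n, k): split n * 2**k over denominations 2**k .. 16384
def splitRec (n : Int) (k : Nat) : PySem.Dict Int Int :=
  if n = 0 then PySem.Dict.empty
  else if 14 ≤ k then (PySem.Dict.empty : PySem.Dict Int Int).insert 16384 n
  else
    let d := splitRec (PySem.Int.floordiv n 2) (k + 1)
    if PySem.Int.mod n 2 ≠ 0 then d.insert ((2 : Int) ^ k) 1 else d
termination_by 14 - k

def default_split_py_alt (amount : Int) : List (Int × Int) :=
  if amount ≤ 0 then [] else (splitRec amount 0).items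

-- ===== PRECONDITION & SPEC =====
def Spec_default_split_py (amount : Int) (out : List (Int × Int)) : Prop := out = default_split_py_alt amount
instance (amount : Int) (out : List (Int × Int)) : Decidable (Spec_default_split_py amount out) := by unfold Spec_default_split_py; infer_instance

-- ===== CLAIM (what is proved, stated in full; the proofs are below) =====
def Claim_equal_default_split_py : Prop := ∀ (amount : Int), Dom_default_split_py amount → Spec_default_split_py amount (default_split_py amount)

-- ===== LEMMAS AND PROOFS =====

-- [2^14, 2^13, …, 2^(14-f)] — the first f+1 entries of A's denomination list
def dnl : Nat → List Int
  | 0 => [16384]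
  | f + 1 => dnl f ++ [(2 : Int) ^ (14 - (f + 1))]

lemma denoms_eq : ([16384, 8192, 4096, 2048, 1024, 512, 256, 128, 64, 32, 16, 8, 4, 2, 1] : List Int) = dnl 14 := by
  decide

-- every key produced by splitRec n k is at least 2^k
lemma splitRec_keys_ge (n : Int) (k : Nat) :
    k ≤ 14 → ∀ key ∈ (splitRec n k).keys, (2 : Int) ^ k ≤ key := by
  induction n, k using splitRec.induct with
  | case1 k =>
    intro _ key hkey
    rw [splitRec, if_pos rfl] at hkey
    simp [PySem.Dict.keys_empty] at hkey
  | case2 n k h h14 =>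
    intro hk key hkey
    rw [splitRec, if_neg h, if_pos h14, PySem.Dict.mem_keys_insert] at hkey
    rcases hkey with rfl | hkey
    · calc (2 : Int) ^ k ≤ 2 ^ 14 := by
            apply pow_le_pow_right₀ (by norm_num) hk
        _ = 16384 := by norm_num
    · simp [PySem.Dict.keys_empty] at hkey
  | case3 n k h h14 hm ih =>
    intro _ key hkey
    have hstep : (2 : Int) ^ k ≤ 2 ^ (k + 1) :=
      pow_le_pow_right₀ (by norm_num) (by omega)
    rw [splitRec, if_neg h, if_neg h14] at hkey
    simp only [if_pos hm, PySem.Dict.mem_keys_insert] at hkey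
    rcases hkey with rfl | hkey
    · exact le_refl _
    · exact le_trans hstep (ih (by omega) key hkey)
  | case4 n k h h14 hm ih =>
    intro _ key hkey
    have hstep : (2 : Int) ^ k ≤ 2 ^ (k + 1) :=
      pow_le_pow_right₀ (by norm_num) (by omega)
    rw [splitRec, if_neg h, if_neg h14] at hkey
    simp only [if_neg hm] at hkey
    exact le_trans hstep (ih (by omega) key hkey)

lemma splitRec_not_contains (n : Int) (k : Nat) (hk : k + 1 ≤ 14) :
    (splitRec n (k + 1)).contains ((2 : Int) ^ k) = false := by
  by_contra h
  rw [Bool.not_eq_false, PySem.Dict.contains_iff_mem_keys] at h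
  have hge := splitRec_keys_ge n (k + 1) hk _ h
  have : (2 : Int) ^ k < 2 ^ (k + 1) :=
    pow_lt_pow_right₀ (by norm_num) (by omega)
  linarith

-- main invariant: A's greedy fold over dnl f extends the dict with exactly splitRec's items
lemma main2 : ∀ f : Nat, f ≤ 14 → ∀ r : Int, 0 ≤ r → ∀ d : PySem.Dict Int Int,
    (∀ j : Nat, 14 - f ≤ j → j ≤ 14 → d.contains ((2 : Int) ^ j) = false) →
    ((dnl f).foldl stepA (d, r)).1.items = d.items ++ (splitRec (r / 2 ^ (14 - f)) (14 - f)).items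
    ∧ ((dnl f).foldl stepA (d, r)).2 = r % 2 ^ (14 - f) := by
  intro f
  induction f with
  | zero =>
    intro _ r hr d hd
    simp only [dnl, List.foldl_cons, List.foldl_nil, Nat.sub_zero]
    have h16 : ((2 : Int) ^ 14) = 16384 := by norm_num
    by_cases hge : r ≥ 16384
    · have hn1 : 1 ≤ r / 16384 := by
        rw [Int.le_ediv_iff_mul_le (by norm_num)]; omega
      have hs : splitRec (r / 2 ^ 14) 14 =
          (PySem.Dict.empty : PySem.Dict Int Int).insert 16384 (r / 16384) := by
        rw [splitRec, if_neg (by rw [h16]; omega), if_pos le_rfl, h16]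
      have hfd : PySem.Int.floordiv r 16384 = r / 16384 :=
        PySem.Int.floordiv_eq_ediv_of_pos (by norm_num)
      unfold stepA
      rw [if_pos hge]
      refine ⟨?_, ?_⟩
      · simp only [hs, hfd]
        have hd16 : d.contains (16384 : Int) = false := by
          have h14 := hd 14 (by omega) le_rfl
          norm_num at h14
          exact h14
        rw [PySem.Dict.items_insert_of_not_contains _ _ hd16,
            PySem.Dict.items_insert_of_not_contains _ _ (PySem.Dict.contains_empty _)]
        rfl
      · simp only [hfd, h16]
        have := Int.mul_ediv_add_emod r 16384
        omega
    · have hn0 : r / 2 ^ 14 = 0 := by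
        rw [h16]; exact Int.ediv_eq_zero_of_lt hr (by omega)
      have hs : splitRec (r / 2 ^ 14) 14 = PySem.Dict.empty := by
        rw [hn0, splitRec, if_pos rfl]
      unfold stepA
      rw [if_neg (by omega)]
      refine ⟨by rw [hs]; simp [show (PySem.Dict.empty : PySem.Dict Int Int).items = [] from rfl], ?_⟩
      rw [h16, Int.emod_eq_of_lt hr (by omega)]
  | succ f ihf =>
    intro hf r hr d hd
    obtain ⟨h1, h2⟩ := ihf (by omega) r hr d (fun j hj1 hj2 => hd j (by omega) hj2)
    set k : Nat := 14 - (f + 1) with hkdef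
    have hk14 : k + 1 = 14 - f := by omega
    have hklt : k < 14 := by omega
    have tpos : (0 : Int) < 2 ^ k := by positivity
    have t1pos : (0 : Int) < 2 ^ (k + 1) := by positivity
    rw [← hk14] at h1 h2
    simp only [dnl, List.foldl_append, List.foldl_cons, List.foldl_nil, ← hkdef]
    rcases hDR : (dnl f).foldl stepA (d, r) with ⟨D, R⟩
    rw [hDR] at h1 h2
    dsimp only at h1 h2
    -- arithmetic decomposition of the remainder
    set a := r % 2 ^ k with hadef
    set A := r % 2 ^ (k + 1) with hAdef
    set q := A / 2 ^ k with hqdef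
    set Q := r / 2 ^ (k + 1) with hQdef
    set n := r / 2 ^ k with hndef
    have ha0 : 0 ≤ a := Int.emod_nonneg _ (by omega)
    have ha1 : a < 2 ^ k := Int.emod_lt_of_pos _ tpos
    have hA0 : 0 ≤ A := Int.emod_nonneg _ (by omega)
    have hA1 : A < 2 ^ (k + 1) := Int.emod_lt_of_pos _ t1pos
    have hAk : A % 2 ^ k = a := by
      rw [hAdef, hadef]
      exact Int.emod_emod_of_dvd r (pow_dvd_pow 2 (by omega))
    have hAq : A = 2 ^ k * q + a := by
      rw [hqdef, ← hAk]
      exact (Int.mul_ediv_add_emod A (2 ^ k)).symm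
    have hq0 : 0 ≤ q := Int.ediv_nonneg hA0 (by omega)
    have hq2 : q < 2 := by
      rw [hqdef, Int.ediv_lt_iff_lt_mul tpos]
      have hpow : (2 : Int) ^ (k + 1) = 2 * 2 ^ k := by ring
      omega
    have hQ0 : 0 ≤ Q := Int.ediv_nonneg hr (by omega)
    have hrQ : r = 2 ^ (k + 1) * Q + A := (Int.mul_ediv_add_emod r (2 ^ (k + 1))).symm
    have hnq : n = q + 2 * Q := by
      rw [hndef]
      conv_lhs => rw [hrQ]
      rw [show (2 : Int) ^ (k + 1) * Q + A = A + (2 * Q) * 2 ^ k from by ring,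
          Int.add_mul_ediv_right _ _ (by omega)]
    have hn2 : n / 2 = Q := by
      rw [hnq, show q + 2 * Q = q + Q * 2 from by ring,
          Int.add_mul_ediv_right _ _ (by norm_num),
          Int.ediv_eq_zero_of_lt hq0 hq2]
      ring
    have hnm : n % 2 = q := by
      rw [hnq, show q + 2 * Q = q + Q * 2 from by ring,
          Int.add_mul_emod_self_right, Int.emod_eq_of_lt hq0 hq2]
    -- the dict built so far does not contain the key 2^k
    have hfresh : D.contains ((2 : Int) ^ k) = false := by
      rw [PySem.Dict.contains_eq_decide_mem_keys, decide_eq_false_iff_not]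
      intro hmem
      simp only [PySem.Dict.keys, h1, List.map_append, List.mem_append] at hmem
      rcases hmem with hmem | hmem
      · have hdk := hd k (by omega) (by omega)
        rw [PySem.Dict.contains_eq_decide_mem_keys, decide_eq_false_iff_not] at hdk
        exact hdk hmem
      · have hge := splitRec_keys_ge Q (k + 1) (by omega) _ hmem
        have h2k : (2 : Int) ^ k < 2 ^ (k + 1) :=
          pow_lt_pow_right₀ (by norm_num) (by omega)
        linarith
    have hfd2 : PySem.Int.floordiv n 2 = n / 2 :=
      PySem.Int.floordiv_eq_ediv_of_pos (by norm_num)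
    have hmd2 : PySem.Int.mod n 2 = n % 2 :=
      PySem.Int.mod_eq_emod_of_pos (by norm_num)
    simp only [stepA]
    rcases show q = 0 ∨ q = 1 from by omega with hq | hq
    · -- bit clear: the step is a no-op and splitRec passes straight through
      have hAa : A = a := by rw [hq] at hAq; simpa using hAq
      have hs : splitRec n k = splitRec Q (k + 1) := by
        by_cases hn0 : n = 0
        · have hQz : Q = 0 := by omega
          rw [hn0, hQz, splitRec, if_pos rfl, splitRec, if_pos rfl]
        · rw [splitRec, if_neg hn0, if_neg (by omega)]
          simp only [hfd2, hn2, hmd2, hnm, hq]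
          simp
      rw [if_neg (by omega)]
      exact ⟨by rw [h1, hs], by omega⟩
    · -- bit set: the step inserts (2^k, 1) and splitRec does the same on the way back
      have hAa : A = 2 ^ k + a := by rw [hq] at hAq; simpa using hAq
      have hn0 : n ≠ 0 := by omega
      have hcount : PySem.Int.floordiv R ((2 : Int) ^ k) = 1 := by
        rw [h2, PySem.Int.floordiv_eq_ediv_of_pos tpos, ← hqdef, hq]
      have hs : splitRec n k = (splitRec Q (k + 1)).insert ((2 : Int) ^ k) 1 := by
        rw [splitRec, if_neg hn0, if_neg (by omega)]
        simp only [hfd2, hn2, hmd2, hnm, hq]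
        simp
      rw [if_pos (by omega)]
      refine ⟨?_, ?_⟩
      · rw [hcount, PySem.Dict.items_insert_of_not_contains _ _ hfresh, hs,
            PySem.Dict.items_insert_of_not_contains _ _ (splitRec_not_contains Q k (by omega)),
            h1, List.append_assoc]
      · rw [hcount]
        omega

-- a nonpositive remainder never fires any positive denomination
lemma foldA_nonpos (l : List Int) (d : PySem.Dict Int Int) (r : Int)
    (hr : r ≤ 0) (hl : ∀ x ∈ l, 0 < x) : l.foldl stepA (d, r) = (d, r) := by
  induction l with
  | nil => rfl
  | cons x xs ih =>
    simp only [List.foldl_cons]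
    rw [show stepA (d, r) x = (d, r) from by
      unfold stepA; rw [if_neg (by have := hl x (by simp); omega)]]
    exact ih (fun y hy => hl y (List.mem_cons_of_mem _ hy))

-- ===== VERDICT (by name: the statement is the Claim_ definition above) =====
theorem default_split_py_spec : Claim_equal_default_split_py := by
  intro amount _
  unfold Spec_default_split_py default_split_py default_split_py_alt
  by_cases hneg : amount ≤ 0
  · rw [if_pos hneg, foldA_nonpos _ _ _ hneg (by decide)]
    rfl
  · rw [if_neg hneg, denoms_eq]
    obtain ⟨h1, _⟩ := main2 14 le_rfl amount (by omega) PySem.Dict.empty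
      (fun j _ _ => PySem.Dict.contains_empty _)
    simpa using h1
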